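-- pv_equiv track=rewrite | github.com/lstanare/graph-decompositions | graph-decomposition.py | develop_cycle_Zn
-- ===== SOURCE A (Python) =====
-- def develop_cycle_Zn(base_cycle: tuple[int, ...], n: int, orbit_size: int | None = None) -> list[tuple[int, ...]]:
--     """Develop (translate) a base cycle over Z_n.
--
--     Returns [(v1+i, v2+i, ..., vk+i) mod n] for i=0..orbit_size-1.
--     If orbit_size is None, uses the full orbit of size n.
--     """
--     if orbit_size is None:
--         orbit_size = n
--     k = len(base_cycle)
--     out: list[tuple[int, ...]] = []
--     for i in range(orbit_size):
--         out.append(tuple(((base_cycle[j] + i) % n) for j in range(k)))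
--     return out
-- ===== SOURCE B (Python) =====
-- def develop_cycle_Zn(base_cycle, n, orbit_size=None):
--     """Develop (translate) a base cycle over Z_n, incrementally:
--     the first row reduces the base cycle mod n, each further row adds 1 mod n
--     to the previous row."""
--     m = n if orbit_size is None else orbit_size
--     out = []
--     if m > 0:
--         row = tuple(v % n for v in base_cycle)
--         out.append(row)
--         for _ in range(m - 1):
--             row = tuple((x + 1) % n for x in row)
--             out.append(row)
--     return out
-- ===== Notes on version B (the rewrite author's own statement) =====
-- stated objective: alternative
-- what changed: Replaces the closed per-row formula (recomputing (base[j]+i) % n for every row i) by an incremental recurrence: the first row is base reduced mod n, and each subsequent row is obtained from the previous row by mapping (x+1) % n over it.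
import Mathlib
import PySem

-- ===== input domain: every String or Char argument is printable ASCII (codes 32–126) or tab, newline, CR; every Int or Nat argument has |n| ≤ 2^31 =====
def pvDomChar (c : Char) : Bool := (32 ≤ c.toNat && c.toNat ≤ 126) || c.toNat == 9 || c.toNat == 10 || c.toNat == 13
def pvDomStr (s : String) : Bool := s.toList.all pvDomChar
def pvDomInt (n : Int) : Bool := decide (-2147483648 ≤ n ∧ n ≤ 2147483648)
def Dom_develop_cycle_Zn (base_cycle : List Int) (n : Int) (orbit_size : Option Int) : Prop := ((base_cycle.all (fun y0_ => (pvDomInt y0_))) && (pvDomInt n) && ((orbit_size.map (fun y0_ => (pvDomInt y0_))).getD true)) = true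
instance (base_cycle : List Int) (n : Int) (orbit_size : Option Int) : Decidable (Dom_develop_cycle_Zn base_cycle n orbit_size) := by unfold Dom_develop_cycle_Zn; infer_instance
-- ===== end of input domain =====

-- B replaces A's closed per-row formula (base[j]+i) % n by an incremental recurrence:
-- first row = base mod n, each next row = previous row shifted by (·+1) % n (objective: alternative).

-- ===== PORT A =====
-- A: out = []; for i in range(orbit_size): out.append(tuple((base_cycle[j]+i) % n for j in range(k)))
def develop_cycle_Zn (base_cycle : List Int) (n : Int) (orbit_size : Option Int) : List (List Int) :=
  let m := orbit_size.getD n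
  (PySem.List.pyRange 0 m).foldl
    (fun out i => out ++ [base_cycle.map (fun v => PySem.Int.mod (v + i) n)]) []

-- ===== PORT B =====
-- B: row := first row; repeat (m-1) times: row := map (x+1) % n over row, append it.
def pvAltChain (n : Int) (row : List Int) : Nat → List (List Int)
  | 0 => []
  | k + 1 =>
    let next := row.map (fun x => PySem.Int.mod (x + 1) n)
    next :: pvAltChain n next k

def develop_cycle_Zn_alt (base_cycle : List Int) (n : Int) (orbit_size : Option Int) : List (List Int) :=
  let m := orbit_size.getD n
  if 0 < m then
    let first := base_cycle.map (fun v => PySem.Int.mod v n)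
    first :: pvAltChain n first (m - 1).toNat
  else []

-- ===== PRECONDITION & SPEC =====
-- Pre_ excludes exactly the inputs where Python A raises ZeroDivisionError:
-- n = 0 with a positive effective orbit size and a nonempty base cycle (a mod is then evaluated).
def Pre_develop_cycle_Zn (base_cycle : List Int) (n : Int) (orbit_size : Option Int) : Prop :=
  ¬ (n = 0 ∧ 0 < orbit_size.getD n ∧ base_cycle ≠ [])
instance (base_cycle : List Int) (n : Int) (orbit_size : Option Int) : Decidable (Pre_develop_cycle_Zn base_cycle n orbit_size) := by unfold Pre_develop_cycle_Zn; infer_instance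

def pvWitness_develop_cycle_Zn : List Int × Int × Option Int := ([0, 2, 5], 3, some 4)

def Spec_develop_cycle_Zn (base_cycle : List Int) (n : Int) (orbit_size : Option Int) (out : List (List Int)) : Prop := out = develop_cycle_Zn_alt base_cycle n orbit_size
instance (base_cycle : List Int) (n : Int) (orbit_size : Option Int) (out : List (List Int)) : Decidable (Spec_develop_cycle_Zn base_cycle n orbit_size out) := by unfold Spec_develop_cycle_Zn; infer_instance

-- ===== CLAIM (what is proved, stated in full; the proofs are below) =====
def Claim_equal_develop_cycle_Zn : Prop := ∀ (base_cycle : List Int) (n : Int) (orbit_size : Option Int), Dom_develop_cycle_Zn base_cycle n orbit_size → Pre_develop_cycle_Zn base_cycle n orbit_size → Spec_develop_cycle_Zn base_cycle n orbit_size (develop_cycle_Zn base_cycle n orbit_size)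

-- ===== LEMMAS AND PROOFS =====

-- A's append-foldl is the map over the range.
theorem pv_foldl_app (l : List Int) (f : Int → List Int) (acc : List (List Int)) :
    l.foldl (fun out i => out ++ [f i]) acc = acc ++ l.map f := by
  induction l generalizing acc with
  | nil => simp
  | cons x xs ih => simp [List.foldl, ih]

-- shifting commutes with Python's mod (Int.fmod), for every n (fmod a 0 = a).
theorem pv_mod_shift (a n : Int) :
    PySem.Int.mod (PySem.Int.mod a n + 1) n = PySem.Int.mod (a + 1) n := by
  show Int.fmod (Int.fmod a n + 1) n = Int.fmod (a + 1) n
  rw [Int.fmod_def a n]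
  have : a - n * (a.fdiv n) + 1 = (a + 1) + n * (-(a.fdiv n)) := by ring
  rw [this, Int.add_mul_fmod_self_left]

-- the incremental chain produces exactly the translated rows.
theorem pv_chain_eq (bc : List Int) (n : Int) (k : Nat) (j : Int) :
    pvAltChain n (bc.map (fun v => PySem.Int.mod (v + j) n)) k
      = (List.range k).map (fun t : Nat => bc.map (fun v => PySem.Int.mod (v + (j + 1 + (t : Int))) n)) := by
  induction k generalizing j with
  | zero => simp [pvAltChain]
  | succ k ih =>
    have hnext : (bc.map (fun v => PySem.Int.mod (v + j) n)).map (fun x => PySem.Int.mod (x + 1) n)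
        = bc.map (fun v => PySem.Int.mod (v + (j + 1)) n) := by
      rw [List.map_map]
      refine List.map_congr_left (fun v _ => ?_)
      show PySem.Int.mod (PySem.Int.mod (v + j) n + 1) n = PySem.Int.mod (v + (j + 1)) n
      rw [pv_mod_shift]; ring_nf
    rw [List.range_succ_eq_map, List.map_cons, List.map_map]
    simp only [pvAltChain, hnext, ih (j + 1)]
    congr 1
    · refine List.map_congr_left (fun v _ => ?_)
      norm_num
    · refine List.map_congr_left (fun t _ => ?_)
      refine List.map_congr_left (fun v _ => ?_)
      have h1 : v + (j + 1 + 1 + (t : Int)) = v + (j + 1 + ((Nat.succ t : Nat) : Int)) := by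
        push_cast; ring
      simp [h1]

-- ===== VERDICT (by name: the statement is the Claim_ definition above) =====
theorem develop_cycle_Zn_spec : Claim_equal_develop_cycle_Zn := by
  intro bc n os _ _
  unfold Spec_develop_cycle_Zn develop_cycle_Zn develop_cycle_Zn_alt
  set m := os.getD n with hm
  by_cases hpos : 0 < m
  · simp only [if_pos hpos]
    obtain ⟨s, hs⟩ : ∃ s : Nat, m = ((s : Int) + 1) := ⟨(m - 1).toNat, by omega⟩
    have hrange : PySem.List.pyRange 0 m = (List.range (s + 1)).map (fun k : Nat => (k : Int)) := by
      rw [hs, show ((s : Int) + 1) = (((s + 1 : Nat) : Nat) : Int) by push_cast; ring]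
      exact PySem.List.pyRange_zero_natCast (s + 1)
    rw [pv_foldl_app, List.nil_append, hrange]
    have hfirst : bc.map (fun v => PySem.Int.mod (v + ((0 : Nat) : Int)) n)
        = bc.map (fun v => PySem.Int.mod v n) := by
      refine List.map_congr_left (fun v _ => ?_); norm_num
    have hchain := pv_chain_eq bc n s (0 : Int)
    rw [show bc.map (fun v => PySem.Int.mod (v + (0 : Int)) n) = bc.map (fun v => PySem.Int.mod v n) from
      List.map_congr_left (fun v _ => by norm_num)] at hchain
    have hm1 : (m - 1).toNat = s := by omega
    rw [hm1, List.range_succ_eq_map]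
    simp only [List.map_cons, List.map_map]
    rw [hchain]
    congr 1
    all_goals try intro a _
    all_goals try simp only [Function.comp_apply]
    all_goals try refine List.map_congr_left ?_
    all_goals try intro b _
    all_goals try simp only [Function.comp_apply]
    all_goals try refine List.map_congr_left ?_
    all_goals try intro c _
    all_goals try congr 1
    all_goals push_cast
    all_goals ring
  · simp only [if_neg hpos]
    have hemp : PySem.List.pyRange 0 m = [] := by
      simp only [PySem.List.pyRange]
      split_ifs with h1 h2 h3 <;> simp_all
    rw [hemp]; rfl
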